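-- pv_equiv track=rewrite | github.com/hack-ink/vibe-style | scripts/rust-style-check.py | last_significant_statement_line
-- ===== SOURCE A (Python) =====
-- def last_significant_statement_line(lines: list[str]) -> str | None:
--     for line in reversed(lines):
--         stripped = line.strip()
--         if not stripped:
--             continue
--         if stripped.startswith("//") or stripped.startswith("#"):
--             continue
--         return stripped
--     return None
-- ===== SOURCE B (Python) =====
-- def last_significant_statement_line(lines: list[str]) -> str | None:
--     result = None
--     for line in lines:
--         stripped = line.strip()
--         if stripped and not stripped.startswith("//") and not stripped.startswith("#"):
--             result = stripped
--     return result
-- ===== Notes on version B (the rewrite author's own statement) =====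
-- stated objective: alternative
-- what changed: Single forward pass keeping the last qualifying stripped line in an accumulator, instead of scanning reversed(lines) and early-returning on the first hit.
import Mathlib
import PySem

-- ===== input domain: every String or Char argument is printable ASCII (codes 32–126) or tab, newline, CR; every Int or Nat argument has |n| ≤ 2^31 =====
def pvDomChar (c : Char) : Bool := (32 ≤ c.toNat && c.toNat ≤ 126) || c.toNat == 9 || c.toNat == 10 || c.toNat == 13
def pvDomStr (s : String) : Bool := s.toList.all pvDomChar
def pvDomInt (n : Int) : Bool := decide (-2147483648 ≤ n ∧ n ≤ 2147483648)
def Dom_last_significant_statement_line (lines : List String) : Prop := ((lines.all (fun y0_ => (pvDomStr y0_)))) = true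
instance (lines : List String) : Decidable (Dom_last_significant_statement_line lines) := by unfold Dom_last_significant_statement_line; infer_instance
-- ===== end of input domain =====

-- B replaces A's reverse scan with early return by a single forward pass keeping the
-- last qualifying stripped line in an accumulator (objective: alternative decomposition).

-- ===== PORT A =====
-- A's loop over reversed(lines): structural recursion over lines.reverse
def lssA_loop : List String → Option String
  | [] => none
  | line :: rest =>
    let stripped := PySem.Str.strip line
    if stripped = "" then lssA_loop rest
    else if PySem.Str.startswith stripped "//" || PySem.Str.startswith stripped "#" then lssA_loop rest
    else some stripped

def last_significant_statement_line (lines : List String) : Option String :=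
  lssA_loop lines.reverse

-- ===== PORT B =====
def last_significant_statement_line_alt (lines : List String) : Option String :=
  lines.foldl
    (fun result line =>
      let stripped := PySem.Str.strip line
      if stripped ≠ "" && !PySem.Str.startswith stripped "//" && !PySem.Str.startswith stripped "#"
      then some stripped else result)
    none

-- ===== PRECONDITION & SPEC =====
def Spec_last_significant_statement_line (lines : List String) (out : Option String) : Prop := out = last_significant_statement_line_alt lines
instance (lines : List String) (out : Option String) : Decidable (Spec_last_significant_statement_line lines out) := by unfold Spec_last_significant_statement_line; infer_instance

-- ===== CLAIM (what is proved, stated in full; the proofs are below) =====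
def Claim_equal_last_significant_statement_line : Prop := ∀ (lines : List String), Dom_last_significant_statement_line lines → Spec_last_significant_statement_line lines (last_significant_statement_line lines)

-- ===== LEMMAS AND PROOFS =====

def pvStep (result : Option String) (line : String) : Option String :=
  let stripped := PySem.Str.strip line
  if stripped ≠ "" && !PySem.Str.startswith stripped "//" && !PySem.Str.startswith stripped "#"
  then some stripped else result

theorem lssA_append (xs : List String) (l : String) :
    lssA_loop (xs ++ [l]) = match lssA_loop xs with
      | some s => some s
      | none => pvStep none l := by
  induction xs with
  | nil =>
    simp only [List.nil_append, lssA_loop, pvStep]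
    by_cases h1 : PySem.Str.strip l = "" <;>
      simp [h1] <;> split_ifs <;> simp_all
  | cons x xs ih =>
    simp only [List.cons_append, lssA_loop]
    split_ifs <;> simp [ih]

theorem foldl_step (lines : List String) (acc : Option String) :
    List.foldl pvStep acc lines = match lssA_loop lines.reverse with
      | some s => some s
      | none => acc := by
  induction lines generalizing acc with
  | nil => simp [lssA_loop]
  | cons l ls ih =>
    simp only [List.foldl_cons, List.reverse_cons, lssA_append, ih]
    cases lssA_loop ls.reverse
    · simp only [pvStep]
      split_ifs <;> rfl
    · rfl

-- ===== VERDICT (by name: the statement is the Claim_ definition above) =====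
theorem last_significant_statement_line_spec : Claim_equal_last_significant_statement_line := by
  intro lines _
  show last_significant_statement_line lines = last_significant_statement_line_alt lines
  unfold last_significant_statement_line last_significant_statement_line_alt
  rw [show (fun (result : Option String) (line : String) =>
      let stripped := PySem.Str.strip line
      if stripped ≠ "" && !PySem.Str.startswith stripped "//" && !PySem.Str.startswith stripped "#"
      then some stripped else result) = pvStep from rfl]
  rw [foldl_step]
  cases lssA_loop lines.reverse <;> rfl
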